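-- pv_equiv track=rewrite | github.com/UlsanCollege-English/week-4-metro-city-help-center-arjun805a | src/challenges.py | undo_recent_actions
-- ===== SOURCE A (Python) =====
-- class ActionStack:
--     """Stack of recent help-center actions using a Python list."""
--
--     def __init__(self) -> None:
--         self.items: list[str] = []
--
--     def push(self, action: str) -> None:
--         """Add an action to the top of the stack."""
--         self.items.append(action)
--
--     def pop(self) -> str | None:
--         """Remove and return the top action, or None if empty."""
--         if self.items:
--             return self.items.pop()
--         return None
--
--     def peek(self) -> str | None:
--         """Return the top action without removing it, or None if empty."""
--         if self.items:
--             return self.items[-1]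
--         return None
--
--     def is_empty(self) -> bool:
--         """Return True if the stack has no actions."""
--         return len(self.items) == 0
--
-- def undo_recent_actions(actions: list[str], undo_count: int) -> list[str]:
--     """Remove the most recent undo_count actions."""
--     stack = ActionStack()
--
--     for action in actions:
--         stack.push(action)
--
--     for _ in range(undo_count):
--         if not stack.is_empty():
--             stack.pop()
--
--     result = []
--     while not stack.is_empty():
--         result.append(stack.pop())
--
--     return result[::-1]  # reverse to maintain original order
-- ===== SOURCE B (Python) =====
-- def undo_recent_actions(actions: list[str], undo_count: int) -> list[str]:
--     """Remove the most recent undo_count actions."""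
--     return actions[:max(0, len(actions) - undo_count)]
-- ===== Notes on version B (the rewrite author's own statement) =====
-- stated objective: simpler
-- what changed: Replaces the stack simulation (push all, pop undo_count times, drain, reverse) with a single closed-form slice actions[:max(0, len(actions)-undo_count)].
import Mathlib
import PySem

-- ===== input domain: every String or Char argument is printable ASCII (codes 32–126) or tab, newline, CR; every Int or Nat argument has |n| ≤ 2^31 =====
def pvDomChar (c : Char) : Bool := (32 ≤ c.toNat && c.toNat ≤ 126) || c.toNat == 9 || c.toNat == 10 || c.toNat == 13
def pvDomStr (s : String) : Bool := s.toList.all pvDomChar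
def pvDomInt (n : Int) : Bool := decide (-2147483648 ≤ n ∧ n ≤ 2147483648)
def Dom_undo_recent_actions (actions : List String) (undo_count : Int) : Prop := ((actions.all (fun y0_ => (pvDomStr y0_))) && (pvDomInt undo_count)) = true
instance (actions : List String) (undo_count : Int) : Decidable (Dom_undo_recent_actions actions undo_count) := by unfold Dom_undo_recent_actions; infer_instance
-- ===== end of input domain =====

-- B replaces A's stack simulation by one closed-form slice (simpler).
-- ===== PORT A =====
-- stack.items after pushing each action (ActionStack.push appends at the end)
def pvPush (st : List String) (a : String) : List String := st ++ [a]
-- one iteration of the undo loop: 'if not stack.is_empty(): stack.pop()' (pop removes the last item)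
def pvUndoStep (st : List String) : List String := if st.isEmpty then st else st.dropLast
-- the drain loop: 'while not stack.is_empty(): result.append(stack.pop())'
def pvDrain (st : List String) (res : List String) : List String :=
  if h : st.isEmpty then res
  else pvDrain st.dropLast (res ++ [st.getLast (by simpa using h)])
termination_by st.length
decreasing_by cases st <;> simp_all [List.length_dropLast]

def undo_recent_actions (actions : List String) (undo_count : Int) : List String :=
  -- stack after the push loop, then the undo loop, then drained into result; result[::-1] (step -1 never fails)
  (PySem.List.slice?
      (pvDrain ((PySem.List.pyRange 0 undo_count 1).foldl (fun st _ => pvUndoStep st)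
                 (actions.foldl pvPush [])) [])
      none none (-1)).getD []

-- ===== PORT B =====
def undo_recent_actions_alt (actions : List String) (undo_count : Int) : List String :=
  PySem.List.slice actions none (some (max 0 ((actions.length : Int) - undo_count)))

-- ===== PRECONDITION & SPEC =====
def Spec_undo_recent_actions (actions : List String) (undo_count : Int) (out : List String) : Prop := out = undo_recent_actions_alt actions undo_count
instance (actions : List String) (undo_count : Int) (out : List String) : Decidable (Spec_undo_recent_actions actions undo_count out) := by unfold Spec_undo_recent_actions; infer_instance

-- ===== CLAIM (what is proved, stated in full; the proofs are below) =====
def Claim_equal_undo_recent_actions : Prop := ∀ (actions : List String) (undo_count : Int), Dom_undo_recent_actions actions undo_count → Spec_undo_recent_actions actions undo_count (undo_recent_actions actions undo_count)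

-- ===== LEMMAS AND PROOFS =====

-- ===== VERDICT (by name: the statement is the Claim_ definition above) =====
lemma pvPush_foldl (s acts : List String) : acts.foldl pvPush s = s ++ acts := by
  induction acts generalizing s with
  | nil => simp
  | cons a t ih => simp [pvPush, ih]

lemma pvUndoStep_iter (k : Nat) (l : List String) :
    (List.range k).foldl (fun st _ => pvUndoStep st) l = l.take (l.length - k) := by
  induction k generalizing l with
  | zero => simp
  | succ n ih =>
      rw [List.range_succ, List.foldl_append, ih]
      simp only [List.foldl_cons, List.foldl_nil, pvUndoStep]
      by_cases h : (l.take (l.length - n)).isEmpty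
      · rw [if_pos h]
        rw [List.isEmpty_iff, List.take_eq_nil_iff] at h
        rcases h with h | h
        · congr 1; omega
        · simp [h]
      · rw [if_neg h]
        rw [List.isEmpty_iff, List.take_eq_nil_iff, not_or] at h
        have hlen : 0 < l.length := List.length_pos_iff.mpr h.2
        rw [List.dropLast_eq_take, List.take_take, List.length_take]
        congr 1
        omega

lemma pvDrain_eq (st res : List String) : pvDrain st res = res ++ st.reverse := by
  induction st, res using pvDrain.induct with
  | case1 st res h => unfold pvDrain; simp_all
  | case2 st res h ih =>
      unfold pvDrain
      rw [dif_neg h]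
      rw [ih]
      conv_rhs => rw [← List.dropLast_append_getLast (show st ≠ [] by simpa using h)]
      simp

theorem undo_recent_actions_spec : Claim_equal_undo_recent_actions := by
  intro actions undo_count _
  unfold Spec_undo_recent_actions undo_recent_actions undo_recent_actions_alt
  rw [PySem.List.slice?_none_none_neg_one]
  simp only [Option.getD_some]
  rw [pvPush_foldl, List.nil_append]
  rw [PySem.List.pyRange_one, List.foldl_map, pvUndoStep_iter]
  rw [pvDrain_eq, List.nil_append, List.reverse_reverse]
  rw [PySem.List.slice_to actions (le_max_left 0 _)]
  rw [List.take_eq_take_iff]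
  rcases le_total 0 ((actions.length : Int) - undo_count) with h | h
  · rw [max_eq_right h]; omega
  · rw [max_eq_left h]; omega
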